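-- pv_equiv track=rewrite | github.com/adang1345/HackerRank | Implementation/Queen's Attack II.py | closest_obstacles
-- ===== SOURCE A (Python) =====
-- def obstacle_type(queen,obstacle):
--     """Given coordinates of queen and an obstacle, return the type of obstacle.
--     -1: not an obstacle for the queen
--     0: up
--     1: up-right
--     2: right
--     3: right-down
--     4: down
--     5: down-left
--     6: left
--     7: left-up"""
--     if queen[0] < obstacle[0] and queen[1] == obstacle[1]:
--         return 0
--     elif queen[0] < obstacle[0] and obstacle[0]-queen[0] == obstacle[1]-queen[1]:
--         return 1
--     elif queen[0] == obstacle[0] and obstacle[1] > queen[1]: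
--         return 2
--     elif queen[0] > obstacle[0] and queen[0]-obstacle[0] == obstacle[1]-queen[1]:
--         return 3
--     elif queen[0] > obstacle[0] and queen[1] == obstacle[1]:
--         return 4
--     elif queen[0] > obstacle[0] and obstacle[0]-queen[0] == obstacle[1]-queen[1]:
--         return 5
--     elif queen[0] == obstacle[0] and obstacle[1] < queen[1]:
--         return 6
--     elif queen[0] < obstacle[0] and queen[0]-obstacle[0] == obstacle[1]-queen[1]:
--         return 7
--     else:
--         return -1
--
-- def dist(a, b):
--     """Return the chessboard distance between 2D points a and b. I define the chessboard distance as the max of the difference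
--     in row and the difference in column."""
--     return max(abs(a[0]-b[0]), abs(a[1]-b[1]))
--
-- def closest_obstacles(queen, obstacles):
--     """Return a list of obstacles closest to the queen in all 8 directions. A direction that has no obstacles is represented as
--     (0,0)."""
--     closest = [(0,0)]*8
--     for obstacle in obstacles:
--         t = obstacle_type(queen, obstacle)
--         if t > -1 and closest[t] == (0,0):
--             closest[t] = obstacle
--         elif t > -1 and dist(queen,obstacle) < dist(queen,closest[t]):
--             closest[t] = obstacle
--     return closest
-- ===== SOURCE B (Python) =====
-- def closest_obstacles(queen, obstacles):
--     """Return a list of obstacles closest to the queen in all 8 directions. A direction that has no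
--     obstacles is represented as (0,0) (so a stored (0,0) obstacle is indistinguishable from 'empty',
--     exactly as in the representation chosen by the spec)."""
--     qr, qc = queen
--
--     def direction(o):
--         """Direction index 0..7 of o as seen from the queen, or -1 if o is not on any of the
--         8 rays (or coincides with the queen), by sign arithmetic on the offset."""
--         dr, dc = o[0] - qr, o[1] - qc
--         if (dr == 0 and dc == 0) or (dr != 0 and dc != 0 and abs(dr) != abs(dc)):
--             return -1
--         return {(1, 0): 0, (1, 1): 1, (0, 1): 2, (-1, 1): 3,
--                 (-1, 0): 4, (-1, -1): 5, (0, -1): 6, (1, -1): 7}[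
--             ((dr > 0) - (dr < 0), (dc > 0) - (dc < 0))]
--
--     def nearer(cur, o):
--         """Keep cur unless it is the empty marker or o is strictly closer (chessboard distance)."""
--         if cur == (0, 0) or max(abs(o[0]-qr), abs(o[1]-qc)) < max(abs(cur[0]-qr), abs(cur[1]-qc)):
--             return o
--         return cur
--
--     result = []
--     for t in range(8):
--         cur = (0, 0)
--         for o in obstacles:
--             if direction(o) == t:
--                 cur = nearer(cur, o)
--         result.append(cur)
--     return result
-- ===== Notes on version B (the rewrite author's own statement) =====
-- stated objective: alternative
-- what changed: Replaces A's 8-branch direction cascade and two-branch sentinel/distance update inside one mutating loop by sign arithmetic with a fixed (sign dr, sign dc) -> index table and 8 independent per-direction scans, each folding a single 'empty-or-strictly-closer' rule.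
import Mathlib
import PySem

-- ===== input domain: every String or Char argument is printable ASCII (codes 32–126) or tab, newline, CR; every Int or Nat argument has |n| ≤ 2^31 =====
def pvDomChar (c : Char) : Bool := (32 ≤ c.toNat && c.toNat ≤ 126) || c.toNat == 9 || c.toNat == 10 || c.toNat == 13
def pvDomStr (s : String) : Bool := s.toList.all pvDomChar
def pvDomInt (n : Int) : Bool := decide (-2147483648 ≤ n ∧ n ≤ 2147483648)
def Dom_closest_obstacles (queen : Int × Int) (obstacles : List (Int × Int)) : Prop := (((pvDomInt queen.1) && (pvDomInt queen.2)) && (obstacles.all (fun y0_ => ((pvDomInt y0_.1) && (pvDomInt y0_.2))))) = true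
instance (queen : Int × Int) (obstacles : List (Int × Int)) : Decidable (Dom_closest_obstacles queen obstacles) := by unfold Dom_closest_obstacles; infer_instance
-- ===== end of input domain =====

-- B replaces A's 8-branch direction cascade and two-branch update by an arithmetic sign dispatch and
-- 8 independent per-direction scans (alternative decomposition; return value only, no mutation).

-- ===== PORT A =====
-- obstacle_type from Source A: the 8-branch cascade, branches in source order
def pvObstacleType (queen obstacle : Int × Int) : Int :=
  if queen.1 < obstacle.1 ∧ queen.2 = obstacle.2 then 0
  else if queen.1 < obstacle.1 ∧ obstacle.1 - queen.1 = obstacle.2 - queen.2 then 1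
  else if queen.1 = obstacle.1 ∧ obstacle.2 > queen.2 then 2
  else if queen.1 > obstacle.1 ∧ queen.1 - obstacle.1 = obstacle.2 - queen.2 then 3
  else if queen.1 > obstacle.1 ∧ queen.2 = obstacle.2 then 4
  else if queen.1 > obstacle.1 ∧ obstacle.1 - queen.1 = obstacle.2 - queen.2 then 5
  else if queen.1 = obstacle.1 ∧ obstacle.2 < queen.2 then 6
  else if queen.1 < obstacle.1 ∧ queen.1 - obstacle.1 = obstacle.2 - queen.2 then 7
  else -1

-- dist from Source A
def pvDist (a b : Int × Int) : Int := max |a.1 - b.1| |a.2 - b.2|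

-- the body of A's for-loop (closest[t] read/written with pyGetD/pySetD; t is in range whenever
-- t > -1, so the defaults are never used)
def pvStepA (queen : Int × Int) (closest : List (Int × Int)) (obstacle : Int × Int) : List (Int × Int) :=
  let t := pvObstacleType queen obstacle
  if t > -1 ∧ PySem.List.pyGetD closest t (0, 0) = ((0, 0) : Int × Int) then
    PySem.List.pySetD closest t obstacle
  else if t > -1 ∧ pvDist queen obstacle < pvDist queen (PySem.List.pyGetD closest t (0, 0)) then
    PySem.List.pySetD closest t obstacle
  else closest

def closest_obstacles (queen : Int × Int) (obstacles : List (Int × Int)) : List (Int × Int) :=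
  obstacles.foldl (pvStepA queen) (List.replicate 8 ((0, 0) : Int × Int))

-- ===== PORT B =====
-- Source B's direction: sign arithmetic plus the fixed table; the key is always present when the
-- guard fails, so the getD default is never used (Python would raise KeyError otherwise)
def pvDirTable : PySem.Dict (Int × Int) Int :=
  PySem.Dict.ofList [((1, 0), 0), ((1, 1), 1), ((0, 1), 2), ((-1, 1), 3),
                     ((-1, 0), 4), ((-1, -1), 5), ((0, -1), 6), ((1, -1), 7)]

def pvDirection (queen o : Int × Int) : Int :=
  let dr := o.1 - queen.1
  let dc := o.2 - queen.2
  if (dr = 0 ∧ dc = 0) ∨ (dr ≠ 0 ∧ dc ≠ 0 ∧ |dr| ≠ |dc|) then -1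
  else (pvDirTable.get? ((if dr > 0 then (1 : Int) else 0) - (if dr < 0 then 1 else 0),
                         (if dc > 0 then (1 : Int) else 0) - (if dc < 0 then 1 else 0))).getD (-1)

def pvNearer (queen cur o : Int × Int) : Int × Int :=
  if cur = ((0, 0) : Int × Int) ∨
      max |o.1 - queen.1| |o.2 - queen.2| < max |cur.1 - queen.1| |cur.2 - queen.2| then o
  else cur

def closest_obstacles_alt (queen : Int × Int) (obstacles : List (Int × Int)) : List (Int × Int) :=
  (PySem.List.pyRange 0 8 1).map (fun t =>
    obstacles.foldl (fun cur o => if pvDirection queen o = t then pvNearer queen cur o else cur)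
      ((0, 0) : Int × Int))

-- ===== PRECONDITION & SPEC =====
def Spec_closest_obstacles (queen : Int × Int) (obstacles : List (Int × Int)) (out : List (Int × Int)) : Prop := out = closest_obstacles_alt queen obstacles
instance (queen : Int × Int) (obstacles : List (Int × Int)) (out : List (Int × Int)) : Decidable (Spec_closest_obstacles queen obstacles out) := by unfold Spec_closest_obstacles; infer_instance

-- ===== CLAIM (what is proved, stated in full; the proofs are below) =====
def Claim_equal_closest_obstacles : Prop := ∀ (queen : Int × Int) (obstacles : List (Int × Int)), Dom_closest_obstacles queen obstacles → Spec_closest_obstacles queen obstacles (closest_obstacles queen obstacles)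

-- ===== LEMMAS AND PROOFS =====

-- A's cascade computes exactly B's sign dispatch
theorem pvType_eq_dir (queen o : Int × Int) : pvObstacleType queen o = pvDirection queen o := by
  unfold pvObstacleType pvDirection
  simp only [Int.abs_eq_natAbs]
  split_ifs <;> first | rfl | omega

-- A's step keeps the state at length 8
theorem pvStepA_length (queen : Int × Int) (closest : List (Int × Int)) (o : Int × Int)
    (h : closest.length = 8) : (pvStepA queen closest o).length = 8 := by
  unfold pvStepA
  dsimp only
  split_ifs <;> simp [PySem.List.length_pySetD, h]

-- per-slot effect of one A-step
theorem pvStepA_getD (queen : Int × Int) (closest : List (Int × Int)) (o : Int × Int)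
    (hlen : closest.length = 8) (t : Int) (ht0 : 0 ≤ t) (ht8 : t < 8) :
    PySem.List.pyGetD (pvStepA queen closest o) t (0, 0) =
      (if pvDirection queen o = t then
        pvNearer queen (PySem.List.pyGetD closest t (0, 0)) o
      else PySem.List.pyGetD closest t (0, 0)) := by
  have hdir := pvType_eq_dir queen o
  have hrange : pvObstacleType queen o = -1 ∨ (0 ≤ pvObstacleType queen o ∧ pvObstacleType queen o < 8) := by
    unfold pvObstacleType; split_ifs <;> omega
  unfold pvStepA
  dsimp only
  rcases hrange with hneg | ⟨hu0, hu8⟩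
  · rw [hneg] at hdir ⊢
    rw [if_neg (by omega : ¬ ((-1 : Int) > -1 ∧ PySem.List.pyGetD closest (-1) (0, 0) = ((0, 0) : Int × Int))),
      if_neg (by omega : ¬ ((-1 : Int) > -1 ∧ pvDist queen o < pvDist queen (PySem.List.pyGetD closest (-1) (0, 0)))),
      if_neg (show ¬ pvDirection queen o = t by omega)]
  · set u := pvObstacleType queen o with hu
    have hset : PySem.List.pySetD closest u o = closest.set u.toNat o :=
      PySem.List.pySetD_of_nonneg closest o hu0
    have hgetu : PySem.List.pyGetD closest u (0, 0) = closest[u.toNat]'(by omega) :=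
      PySem.List.pyGetD_eq_getElem closest (0, 0) hu0 (by omega)
    have hgett : PySem.List.pyGetD closest t (0, 0) = closest[t.toNat]'(by omega) :=
      PySem.List.pyGetD_eq_getElem closest (0, 0) ht0 (by omega)
    have hgetset : PySem.List.pyGetD (closest.set u.toNat o) t (0, 0) =
        if u = t then o else closest[t.toNat]'(by omega) := by
      rw [PySem.List.pyGetD_eq_getElem (closest.set u.toNat o) (0, 0) ht0 (by simp [hlen]; omega)]
      rw [List.getElem_set]
      by_cases h : u = t
      · rw [if_pos (by omega), if_pos h]
      · rw [if_neg (by omega), if_neg h]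
    rw [← hdir]
    by_cases hA1 : u > -1 ∧ PySem.List.pyGetD closest u (0, 0) = ((0, 0) : Int × Int)
    · rw [if_pos hA1, hset, hgetset]
      by_cases h : u = t
      · rw [if_pos h, if_pos h]
        unfold pvNearer
        rw [if_pos (Or.inl (by rw [← h]; exact hA1.2))]
      · rw [if_neg h, if_neg h, hgett]
    · rw [if_neg hA1]
      by_cases hA2 : u > -1 ∧ pvDist queen o < pvDist queen (PySem.List.pyGetD closest u (0, 0))
      · rw [if_pos hA2, hset, hgetset]
        by_cases h : u = t
        · rw [if_pos h, if_pos h]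
          unfold pvNearer
          rw [if_pos (Or.inr (by
            have := hA2.2
            rw [h] at this
            simpa [pvDist, abs_sub_comm] using this))]
        · rw [if_neg h, if_neg h, hgett]
      · rw [if_neg hA2]
        by_cases h : u = t
        · rw [if_pos h]
          unfold pvNearer
          rw [if_neg]
          rintro (hc | hlt)
          · exact hA1 ⟨by omega, by rw [h]; exact hc⟩
          · refine hA2 ⟨by omega, ?_⟩
            rw [h]
            simpa [pvDist, abs_sub_comm] using hlt
        · rw [if_neg h]

-- the whole A-fold, slot by slot
theorem pvFoldA_getD (queen : Int × Int) (l : List (Int × Int)) :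
    ∀ (closest : List (Int × Int)), closest.length = 8 → ∀ (t : Int), 0 ≤ t → t < 8 →
    PySem.List.pyGetD (l.foldl (pvStepA queen) closest) t (0, 0) =
      l.foldl (fun cur o => if pvDirection queen o = t then pvNearer queen cur o else cur)
        (PySem.List.pyGetD closest t (0, 0)) := by
  induction l with
  | nil => intro closest _ t _ _; rfl
  | cons o l ih =>
    intro closest hlen t ht0 ht8
    simp only [List.foldl_cons]
    rw [ih (pvStepA queen closest o) (pvStepA_length queen closest o hlen) t ht0 ht8,
      pvStepA_getD queen closest o hlen t ht0 ht8]

theorem pvFoldA_length (queen : Int × Int) (l : List (Int × Int)) :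
    ∀ (closest : List (Int × Int)), closest.length = 8 →
    (l.foldl (pvStepA queen) closest).length = 8 := by
  induction l with
  | nil => intro closest h; exact h
  | cons o l ih => intro closest h; exact ih _ (pvStepA_length queen closest o h)

-- ===== VERDICT (by name: the statement is the Claim_ definition above) =====
theorem closest_obstacles_spec : Claim_equal_closest_obstacles := by
  unfold Claim_equal_closest_obstacles
  intro queen obstacles _
  unfold Spec_closest_obstacles closest_obstacles closest_obstacles_alt
  have hrange : PySem.List.pyRange 0 8 1 = [0, 1, 2, 3, 4, 5, 6, 7] := by decide
  rw [hrange]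
  have hlen : (obstacles.foldl (pvStepA queen) (List.replicate 8 ((0, 0) : Int × Int))).length = 8 :=
    pvFoldA_length queen obstacles _ (by simp)
  apply List.ext_getElem (by rw [hlen]; simp)
  intro i hi _
  rw [hlen] at hi
  have hget : (obstacles.foldl (pvStepA queen) (List.replicate 8 ((0, 0) : Int × Int)))[i]'(by rw [hlen]; exact hi) =
      PySem.List.pyGetD (obstacles.foldl (pvStepA queen) (List.replicate 8 ((0, 0) : Int × Int)))
        (i : Int) (0, 0) := by
    simp only [PySem.List.pyGetD_natCast]
    rw [List.getD_eq_getElem _ _ (by rw [hlen]; exact hi)]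
  rw [hget, pvFoldA_getD queen obstacles _ (by simp) (i : Int) (by omega) (by omega)]
  have hinit : PySem.List.pyGetD (List.replicate 8 ((0, 0) : Int × Int)) (i : Int) (0, 0) = (0, 0) := by
    simp only [PySem.List.pyGetD_natCast]
    rw [List.getD_eq_getElem _ _ (by simp; omega), List.getElem_replicate]
  rw [hinit]
  interval_cases i <;> rfl
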